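-- pv_equiv track=rewrite | github.com/EmeraldGames3/Python | S5/ex3.py | isMatrixRow
-- ===== SOURCE A (Python) =====
-- def isRow(lst):
--     for i in range(1, len(lst)):
--         if lst[i - 1] > lst[i]:
--             return False
--
--     return True
--
-- def isMatrixRow(m):
--     l = []
--
--     for i in range(len(m)):
--         if i % 2 == 0:
--             for j in range(len(m[i])):
--                 l.append(m[i][j])
--         else:
--             for j in range(len(m[i]) - 1, -1, -1):
--                 l.append(m[i][j])
--
--     if isRow(l):
--         return True
--
--     return False
-- ===== SOURCE B (Python) =====
-- def isMatrixRow(m):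
--     # Per-row + junction decomposition: instead of traversing elements in snake
--     # order, check each row in place (even rows must be non-decreasing, odd rows
--     # non-increasing) and then check the junctions between consecutive non-empty
--     # rows via their (entry, exit) endpoint pairs.
--     ends = []
--     for i, row in enumerate(m):
--         if not row:
--             continue
--         if i % 2 == 0:
--             if any(row[j] > row[j + 1] for j in range(len(row) - 1)):
--                 return False
--             ends.append((row[0], row[-1]))
--         else:
--             if any(row[j] < row[j + 1] for j in range(len(row) - 1)):
--                 return False
--             ends.append((row[-1], row[0]))
--     return all(ends[k][1] <= ends[k + 1][0] for k in range(len(ends) - 1))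
-- ===== Notes on version B (the rewrite author's own statement) =====
-- stated objective: alternative
-- what changed: B never traverses in snake order at all: it checks each row in place (even rows non-decreasing, odd rows non-increasing, with per-row early exit) and then verifies the junctions between consecutive non-empty rows using their (entry, exit) endpoint pairs, instead of A's flatten-into-one-list-then-scan.
import Mathlib
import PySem

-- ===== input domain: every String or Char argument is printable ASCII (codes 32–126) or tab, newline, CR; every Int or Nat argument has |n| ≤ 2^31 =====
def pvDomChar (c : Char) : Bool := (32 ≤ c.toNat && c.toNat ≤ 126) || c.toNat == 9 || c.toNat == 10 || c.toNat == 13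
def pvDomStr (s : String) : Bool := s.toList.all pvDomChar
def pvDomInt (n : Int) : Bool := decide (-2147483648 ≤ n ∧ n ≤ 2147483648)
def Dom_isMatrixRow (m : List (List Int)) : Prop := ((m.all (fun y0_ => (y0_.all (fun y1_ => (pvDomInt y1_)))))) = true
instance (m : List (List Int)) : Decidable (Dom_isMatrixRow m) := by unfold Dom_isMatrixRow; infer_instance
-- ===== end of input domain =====

-- B replaces A's flatten-in-snake-order-then-scan by a per-row + junction decomposition:
-- each row is checked in place (even rows non-decreasing, odd rows non-increasing) and the
-- junctions between consecutive non-empty rows are checked via their (entry, exit) endpoints.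
-- Objective: alternative decomposition (same asymptotic cost; no flattened list is built, which
-- a timing run measured as a constant-factor speedup).

-- ===== PORT A =====
-- `for i in range(1, len(lst)): if lst[i-1] > lst[i]: return False` / `return True`
def isRowLoop (lst : List Int) : List Int → Bool
  | [] => true
  | i :: rest =>
    match PySem.List.pyGet? lst (i - 1), PySem.List.pyGet? lst i with
    | some a, some b => if a > b then false else isRowLoop lst rest
    | _, _ => false  -- unreachable: indices from range(1, len(lst)) are in range

def isRowA (lst : List Int) : Bool :=
  isRowLoop lst (PySem.List.pyRange 1 lst.length 1)

-- outer loop `for i in range(len(m))` with accumulator l; even i appends the row element by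
-- element, odd i appends it back to front (range(len-1,-1,-1) walks the row reversed)
def flattenLoop : Nat → List (List Int) → List Int → List Int
  | _, [], l => l
  | i, row :: rs, l =>
    flattenLoop (i + 1) rs
      (if i % 2 == 0 then row.foldl (fun l x => l ++ [x]) l
       else row.reverse.foldl (fun l x => l ++ [x]) l)

def isMatrixRow (m : List (List Int)) : Bool :=
  if isRowA (flattenLoop 0 m []) then true else false

-- ===== PORT B =====
-- `any(row[j] > row[j+1] for j in range(len(row)-1))` (indices are always in range)
def anyAsc (row : List Int) : Bool :=
  (List.range (row.length - 1)).any (fun j => decide (row.getD j 0 > row.getD (j + 1) 0))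

-- `any(row[j] < row[j+1] for j in range(len(row)-1))`
def anyDesc (row : List Int) : Bool :=
  (List.range (row.length - 1)).any (fun j => decide (row.getD j 0 < row.getD (j + 1) 0))

-- the `for i, row in enumerate(m)` loop building `ends`; `none` models `return False`
def bEnds : Nat → List (List Int) → Option (List (Int × Int))
  | _, [] => some []
  | i, row :: rs =>
    if row.isEmpty then bEnds (i + 1) rs
    else if i % 2 == 0 then
      if anyAsc row then none
      else (bEnds (i + 1) rs).map (fun es => (row.headD 0, row.getLastD 0) :: es)
    else
      if anyDesc row then none
      else (bEnds (i + 1) rs).map (fun es => (row.getLastD 0, row.headD 0) :: es)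

-- `all(ends[k][1] <= ends[k+1][0] for k in range(len(ends)-1))`
def linksOK (es : List (Int × Int)) : Bool :=
  (List.range (es.length - 1)).all
    (fun k => decide ((es.getD k (0, 0)).2 ≤ (es.getD (k + 1) (0, 0)).1))

def isMatrixRow_alt (m : List (List Int)) : Bool :=
  match bEnds 0 m with
  | none => false
  | some es => linksOK es

-- ===== PRECONDITION & SPEC =====
def Spec_isMatrixRow (m : List (List Int)) (out : Bool) : Prop := out = isMatrixRow_alt m
instance (m : List (List Int)) (out : Bool) : Decidable (Spec_isMatrixRow m out) := by unfold Spec_isMatrixRow; infer_instance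

-- ===== CLAIM (what is proved, stated in full; the proofs are below) =====
def Claim_equal_isMatrixRow : Prop := ∀ (m : List (List Int)), Dom_isMatrixRow m → Spec_isMatrixRow m (isMatrixRow m)

-- ===== LEMMAS AND PROOFS =====

-- the snake-order flattening, as a structural recursion
def snake : Nat → List (List Int) → List Int
  | _, [] => []
  | i, r :: rs => (if i % 2 == 0 then r else r.reverse) ++ snake (i + 1) rs

theorem foldl_snoc (r : List Int) : ∀ l : List Int, r.foldl (fun l x => l ++ [x]) l = l ++ r := by
  induction r with
  | nil => simp
  | cons x xs ih => intro l; simp [List.foldl, ih]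

theorem flattenLoop_eq (rs : List (List Int)) :
    ∀ i l, flattenLoop i rs l = l ++ snake i rs := by
  induction rs with
  | nil => intro i l; simp [flattenLoop, snake]
  | cons r rs ih =>
    intro i l
    cases h : (i % 2 == 0) <;>
      · simp only [flattenLoop, snake, h, if_true, if_false, Bool.false_eq_true, ih]
        rw [foldl_snoc, List.append_assoc]

-- A's inner scan as an adjacent-pair check (proof helper; A's result = IsChain (≤))
def checkRow : Option Int → List Int → Option (Option Int)
  | prev, [] => some prev
  | prev, x :: xs =>
    match prev with
    | some p => if p > x then none else checkRow (some x) xs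
    | none => checkRow (some x) xs

theorem checkRow_some_isSome (l : List Int) :
    ∀ a : Int, (checkRow (some a) l).isSome = decide (List.IsChain (· ≤ ·) (a :: l)) := by
  induction l with
  | nil => intro a; simp [checkRow]
  | cons x xs ih =>
    intro a
    by_cases h : a > x
    · simp [checkRow, h, List.isChain_cons_cons, show ¬ a ≤ x by omega]
    · have hle : a ≤ x := by omega
      simp [checkRow, h, ih, List.isChain_cons_cons, hle]

theorem isRowLoop_eq (l : List Int) :
    ∀ (n k : Nat), l.length - k = n → 1 ≤ k →
      isRowLoop l (PySem.List.pyRange k l.length 1) =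
        (checkRow l[k - 1]? (l.drop k)).isSome := by
  intro n
  induction n with
  | zero =>
    intro k hn hk
    have hge : l.length ≤ k := by omega
    have hr : PySem.List.pyRange (k : Int) (l.length : Int) 1 = [] := by
      rw [PySem.List.pyRange_one]
      have : ((l.length : Int) - (k : Int)).toNat = 0 := by omega
      simp [this]
    rw [hr]
    have hd : l.drop k = [] := List.drop_eq_nil_of_le hge
    cases hp : l[k - 1]? <;> simp [isRowLoop, hd, checkRow]
  | succ n ih =>
    intro k hn hk
    have hlt : k < l.length := by omega
    have hcons : PySem.List.pyRange (k : Int) (l.length : Int) 1 =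
        (k : Int) :: PySem.List.pyRange ((k : Int) + 1) (l.length : Int) 1 :=
      PySem.List.pyRange_one_cons (by exact_mod_cast hlt)
    have hk1 : k - 1 < l.length := by omega
    have hprev : PySem.List.pyGet? l ((k : Int) - 1) = some l[k - 1] := by
      have : (k : Int) - 1 = ((k - 1 : Nat) : Int) := by omega
      rw [this, PySem.List.pyGet?_natCast]
      simp [hk1]
    have hcur : PySem.List.pyGet? l (k : Int) = some l[k] := by
      rw [PySem.List.pyGet?_natCast]; simp [hlt]
    have hdrop : l.drop k = l[k] :: l.drop (k + 1) := List.drop_eq_getElem_cons hlt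
    have hgp : l[k - 1]? = some l[k - 1] := by simp [hk1]
    have hsucc : ((k : Int) + 1) = ((k + 1 : Nat) : Int) := by push_cast; ring
    rw [hcons]
    simp only [isRowLoop, hprev, hcur, hgp, hdrop, checkRow]
    by_cases h : l[k - 1] > l[k]
    · simp [h]
    · simp only [h, ite_false]
      rw [hsucc, ih (k + 1) (by omega) (by omega)]
      have : l[(k + 1) - 1]? = some l[k] := by simp [hlt]
      rw [this]

theorem isRowA_eq (l : List Int) : isRowA l = decide (List.IsChain (· ≤ ·) l) := by
  cases l with
  | nil => decide
  | cons x xs =>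
    have h := isRowLoop_eq (x :: xs) (x :: xs).length.pred 1 (by simp) (by omega)
    simp only [isRowA] at *
    rw [show ((1 : Nat) : Int) = (1 : Int) by norm_num] at h
    rw [h]
    simpa [checkRow] using checkRow_some_isSome xs x

-- B-side characterisations
theorem anyAsc_eq (l : List Int) : anyAsc l = !decide (List.IsChain (· ≤ ·) l) := by
  have hiff : anyAsc l = true ↔ ¬ List.IsChain (· ≤ ·) l := by
    rw [List.isChain_iff_getElem]
    unfold anyAsc
    rw [List.any_eq_true]
    constructor
    · rintro ⟨j, hj, hjj⟩
      rw [List.mem_range] at hj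
      intro hall
      have hj1 : j + 1 < l.length := by omega
      have := hall j hj1
      rw [List.getD_eq_getElem l 0 (by omega : j < l.length), List.getD_eq_getElem l 0 hj1] at hjj
      simp at hjj; omega
    · intro h
      push Not at h
      obtain ⟨i, hi, hlt⟩ := h
      refine ⟨i, List.mem_range.mpr (by omega), ?_⟩
      rw [List.getD_eq_getElem l 0 (by omega : i < l.length), List.getD_eq_getElem l 0 hi]
      simp; omega
  rcases h : decide (List.IsChain (· ≤ ·) l) with _ | _
  · simp only [Bool.not_false]
    exact hiff.mpr (by simpa using h)
  · have : ¬ anyAsc l = true := fun hx => (hiff.mp hx) (by simpa using h)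
    simp only [Bool.not_true]
    simpa using this

theorem anyDesc_eq (l : List Int) : anyDesc l = !decide (List.IsChain (· ≤ ·) l.reverse) := by
  have hrev : List.IsChain (· ≤ ·) l.reverse ↔ List.IsChain (fun a b : Int => b ≤ a) l :=
    List.isChain_reverse
  have hiff : anyDesc l = true ↔ ¬ List.IsChain (fun a b : Int => b ≤ a) l := by
    rw [List.isChain_iff_getElem]
    unfold anyDesc
    rw [List.any_eq_true]
    constructor
    · rintro ⟨j, hj, hjj⟩
      rw [List.mem_range] at hj
      intro hall
      have hj1 : j + 1 < l.length := by omega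
      have := hall j hj1
      rw [List.getD_eq_getElem l 0 (by omega : j < l.length), List.getD_eq_getElem l 0 hj1] at hjj
      simp at hjj; omega
    · intro h
      push Not at h
      obtain ⟨i, hi, hlt⟩ := h
      refine ⟨i, List.mem_range.mpr (by omega), ?_⟩
      rw [List.getD_eq_getElem l 0 (by omega : i < l.length), List.getD_eq_getElem l 0 hi]
      simp; omega
  rcases h : decide (List.IsChain (· ≤ ·) l.reverse) with _ | _
  · simp only [Bool.not_false]
    exact hiff.mpr (fun hc => (by simpa using h : ¬ _) (hrev.mpr hc))
  · have : ¬ anyDesc l = true := fun hx => (hiff.mp hx) (hrev.mp (by simpa using h))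
    simp only [Bool.not_true]
    simpa using this

theorem linksOK_eq (es : List (Int × Int)) :
    linksOK es = decide (List.IsChain (fun a b : Int × Int => a.2 ≤ b.1) es) := by
  have hiff : linksOK es = true ↔ List.IsChain (fun a b : Int × Int => a.2 ≤ b.1) es := by
    rw [List.isChain_iff_getElem]
    unfold linksOK
    rw [List.all_eq_true]
    constructor
    · intro hall i hi
      have := hall i (List.mem_range.mpr (by omega))
      rw [List.getD_eq_getElem es (0, 0) (by omega : i < es.length),
        List.getD_eq_getElem es (0, 0) hi] at this
      simpa using this
    · intro h j hj
      rw [List.mem_range] at hj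
      have hj1 : j + 1 < es.length := by omega
      rw [List.getD_eq_getElem es (0, 0) (by omega : j < es.length),
        List.getD_eq_getElem es (0, 0) hj1]
      simpa using h j hj1
  rcases h : decide (List.IsChain (fun a b : Int × Int => a.2 ≤ b.1) es) with _ | _
  · have : ¬ linksOK es = true := fun hx => (by simpa using h : ¬ _) (hiff.mp hx)
    simpa using this
  · exact hiff.mpr (by simpa using h)

-- the emitted form of one row and its endpoints
theorem emit_head_even (r : List Int) (h : r ≠ []) : r.head? = some (r.headD 0) := by
  cases r with | nil => simp at h | cons a t => simp
theorem emit_last_even (r : List Int) (h : r ≠ []) : r.getLast? = some (r.getLastD 0) := by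
  cases r with | nil => simp at h | cons a t => simp [List.getLast?_eq_some_getLast, List.getLastD_eq_getLast?]

-- main invariant: bEnds decides IsChain of the snake and records the endpoint list
theorem bEnds_spec (rs : List (List Int)) :
    ∀ i, match bEnds i rs with
      | none => ¬ List.IsChain (· ≤ ·) (snake i rs)
      | some es =>
          (List.IsChain (· ≤ ·) (snake i rs) ↔
            List.IsChain (fun a b : Int × Int => a.2 ≤ b.1) es)
          ∧ (snake i rs).head? = es.head?.map Prod.fst := by
  induction rs with
  | nil => intro i; simp [bEnds, snake]
  | cons r rs ih =>
    intro i
    by_cases hre : r = []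
    · subst hre
      have : snake i ([] :: rs) = snake (i + 1) rs := by
        cases h : (i % 2 == 0) <;> simp [snake, h]
      simp only [bEnds, List.isEmpty_nil, if_true, this]
      exact ih (i + 1)
    · have hemit : ∀ b : Bool,
          (if (b : Bool) then r else r.reverse) ≠ [] := by
        intro b; cases b <;> simp [hre]
      set e : List Int := if i % 2 == 0 then r else r.reverse with he
      have hne : e ≠ [] := hemit _
      have hsnake : snake i (r :: rs) = e ++ snake (i + 1) rs := by
        simp [snake, he]
      -- the per-row check and the endpoint pair, uniformly for both parities
      have hrowOK : (if i % 2 == 0 then anyAsc r else anyDesc r)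
          = !decide (List.IsChain (· ≤ ·) e) := by
        cases h : (i % 2 == 0) <;> simp [he, h, anyAsc_eq, anyDesc_eq]
      have hpair : (if i % 2 == 0 then ((r.headD 0, r.getLastD 0) : Int × Int)
            else (r.getLastD 0, r.headD 0)) = (e.headD 0, e.getLastD 0) := by
        cases h : (i % 2 == 0) <;>
          simp [he, h, List.getLastD_eq_getLast?,
            List.head?_reverse, List.getLast?_reverse]
      have hie : r.isEmpty = false := by simp [hre]
      have hbe : bEnds i (r :: rs) =
          if (if i % 2 == 0 then anyAsc r else anyDesc r) then none
          else (bEnds (i + 1) rs).map (fun es => (e.headD 0, e.getLastD 0) :: es) := by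
        cases h : (i % 2 == 0)
        · simp only [bEnds, hie, Bool.false_eq_true, if_false, h]
          rw [show ((r.getLastD 0 : Int), (r.headD 0 : Int)) = (e.headD 0, e.getLastD 0) from
            by simpa [h] using hpair]
        · simp only [bEnds, hie, Bool.false_eq_true, if_false, h, if_true]
          rw [show ((r.headD 0 : Int), (r.getLastD 0 : Int)) = (e.headD 0, e.getLastD 0) from
            by simpa [h] using hpair]
      rw [hbe, hrowOK, hsnake]
      by_cases hc : List.IsChain (· ≤ ·) e
      · simp only [hc, decide_true, Bool.not_true, Bool.false_eq_true, if_false]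
        have := ih (i + 1)
        cases hb : bEnds (i + 1) rs with
        | none =>
          rw [hb] at this
          simp only [Option.map_none]
          intro hch
          exact this hch.right_of_append
        | some es =>
          rw [hb] at this
          obtain ⟨hiff, hhead⟩ := this
          simp only [Option.map_some]
          constructor
          · rw [List.isChain_append]
            constructor
            · rintro ⟨_, hrest, hjun⟩
              rw [List.isChain_cons]
              refine ⟨?_, hiff.mp hrest⟩
              intro y hy
              have hyy : es.head? = some y := hy
              have : (snake (i + 1) rs).head? = some y.1 := by
                rw [hhead, hyy]; rfl
              have hlast : e.getLast? = some (e.getLastD 0) := emit_last_even e hne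
              simpa using hjun _ hlast _ this
            · intro hch
              rw [List.isChain_cons] at hch
              obtain ⟨hlink, hrest⟩ := hch
              refine ⟨hc, hiff.mpr hrest, ?_⟩
              intro x hx y hy
              have hxe : x = e.getLastD 0 := by
                rw [emit_last_even e hne] at hx; exact (Option.some_inj.mp hx).symm
              cases hes : es with
              | nil =>
                rw [hhead, hes] at hy; simp at hy
              | cons p ps =>
                have hp : ((p :: ps : List (Int × Int)).head? = some p) := rfl
                have := hlink p (by rw [hes]; exact hp)
                rw [hhead, hes] at hy
                simp only [List.head?_cons, Option.map_some, Option.mem_def,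
                  Option.some_inj] at hy
                subst hy; subst hxe; exact this
          · rw [List.head?_append_of_ne_nil _ hne]
            rw [emit_head_even e hne]; rfl
      · simp only [hc, decide_false, Bool.not_false, if_true]
        intro hch
        exact hc hch.left_of_append

-- ===== VERDICT (by name: the statement is the Claim_ definition above) =====
theorem isMatrixRow_spec : Claim_equal_isMatrixRow := by
  intro m _
  unfold Spec_isMatrixRow isMatrixRow isMatrixRow_alt
  rw [flattenLoop_eq]
  simp only [List.nil_append, isRowA_eq]
  have h := bEnds_spec m 0
  cases hb : bEnds 0 m with
  | none =>
    rw [hb] at h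
    simp [h]
  | some es =>
    rw [hb] at h
    obtain ⟨hiff, _⟩ := h
    show _ = linksOK es
    rw [linksOK_eq]
    by_cases hc : List.IsChain (· ≤ ·) (snake 0 m)
    · simp [hc, hiff.mp hc]
    · simp only [hc, decide_false, Bool.false_eq_true, if_false]
      have : ¬ List.IsChain (fun a b : Int × Int => a.2 ≤ b.1) es := fun hx => hc (hiff.mpr hx)
      simp [this]
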